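-- pv_equiv track=rewrite | github.com/Mohanavelayyavu/Python_programing | String/7.3.1.py | largest_subsequence
-- ===== SOURCE A (Python) =====
-- def largest_subsequence(s, k):
--     freq_map = {}
--     for char in s:
--         freq_map[char] = freq_map.get(char, 0) + 1
--     t = ''
--     for char in s:
--         if freq_map[char] >= k and char not in t:
--             t += char
--     return t
-- ===== SOURCE B (Python) =====
-- def largest_subsequence(s, k):
--     if not s:
--         return ''
--     c = s[0]
--     head = c if s.count(c) >= k else ''
--     return head + largest_subsequence(s.replace(c, ''), k)
-- ===== Notes on version B (the rewrite author's own statement) =====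
-- stated objective: alternative
-- what changed: B is a recursion on the structure of the string: it decides the first character from its total count, deletes every occurrence of that character with str.replace, and recurses on the remainder, so no frequency dict, no membership test against a growing result and no second scan of s exist; A is two iterative passes (count dict, then a filtering loop with an 'in t' test).
import Mathlib
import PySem

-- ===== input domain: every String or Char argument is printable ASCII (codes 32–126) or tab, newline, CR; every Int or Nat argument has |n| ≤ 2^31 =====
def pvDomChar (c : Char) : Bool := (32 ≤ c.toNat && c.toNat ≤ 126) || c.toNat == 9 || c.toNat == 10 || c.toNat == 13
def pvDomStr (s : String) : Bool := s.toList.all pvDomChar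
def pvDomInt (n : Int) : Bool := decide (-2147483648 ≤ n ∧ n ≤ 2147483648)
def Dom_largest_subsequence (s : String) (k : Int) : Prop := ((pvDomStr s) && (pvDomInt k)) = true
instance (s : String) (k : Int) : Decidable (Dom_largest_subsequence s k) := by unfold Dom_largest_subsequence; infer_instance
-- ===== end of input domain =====

-- B replaces A's two iterative passes (count dict + filtering loop with an 'in t' test) by a
-- recursion that decides s[0] from its total count, deletes all its occurrences and recurses;
-- objective: a genuinely different (recursive, deletion-based) algorithm of the same cost.
-- ===== PORT A =====
def largest_subsequence (s : String) (k : Int) : String :=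
  let freq_map : PySem.Dict Char Int :=
    s.toList.foldl (fun d ch => d.insert ch (d.getD ch 0 + 1)) PySem.Dict.empty
  let t : List Char :=
    s.toList.foldl (fun t ch => if freq_map.getD ch 0 ≥ k ∧ ch ∉ t then t ++ [ch] else t) []
  String.mk t

-- ===== PORT B =====
-- Recursive helper on List Char: s[0] → c, s.count(c) → List.count, and s.replace(c, '')
-- (delete every occurrence of the single character c) → filter (!· == c), which is exact.
def lsubRec (l : List Char) (k : Int) : List Char :=
  match l with
  | [] => []
  | c :: rest =>
    let head := if ((c :: rest).count c : Int) ≥ k then [c] else []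
    head ++ lsubRec (rest.filter (fun d => !(d == c))) k
termination_by l.length
decreasing_by
  simp only [List.length_unattach]
  exact Nat.lt_succ_of_le (le_trans (List.length_filter_le _ _) (by simp))

def largest_subsequence_alt (s : String) (k : Int) : String :=
  String.mk (lsubRec s.toList k)

-- ===== PRECONDITION & SPEC =====
def Spec_largest_subsequence (s : String) (k : Int) (out : String) : Prop := out = largest_subsequence_alt s k
instance (s : String) (k : Int) (out : String) : Decidable (Spec_largest_subsequence s k out) := by unfold Spec_largest_subsequence; infer_instance

-- ===== CLAIM =====
def Claim_equal_largest_subsequence : Prop := ∀ (s : String) (k : Int), Dom_largest_subsequence s k → Spec_largest_subsequence s k (largest_subsequence s k)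

-- ===== LEMMAS AND PROOFS =====

-- A's filtering loop, run with accumulator t, equals the filter of the dedup loop's accumulator.
theorem pv_fold_filter (p : Char → Bool) :
    ∀ (l t d : List Char), t = d.filter p →
      l.foldl (fun t ch => if p ch = true ∧ ch ∉ t then t ++ [ch] else t) t
        = (l.foldl PySem.Set.add d).filter p := by
  intro l
  induction l with
  | nil => intro t d h; simpa using h
  | cons c l ih =>
    intro t d h
    simp only [List.foldl_cons]
    by_cases hc : c ∈ d
    · have hadd : PySem.Set.add d c = d := by
        simp [PySem.Set.add, PySem.Set.contains, hc]
      rw [hadd]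
      have hstep : (if p c = true ∧ c ∉ t then t ++ [c] else t) = t := by
        by_cases hp : p c = true
        · have : c ∈ t := by subst h; exact List.mem_filter.mpr ⟨hc, hp⟩
          simp [this]
        · simp [hp]
      rw [hstep]; exact ih t d h
    · have hadd : PySem.Set.add d c = d ++ [c] := by
        simp [PySem.Set.add, PySem.Set.contains, hc]
      rw [hadd]
      have hct : c ∉ t := by subst h; intro hm; exact hc (List.mem_filter.mp hm).1
      by_cases hp : p c = true
      · rw [if_pos ⟨hp, hct⟩]
        exact ih (t ++ [c]) (d ++ [c]) (by simp [List.filter_append, hp, h])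
      · rw [if_neg (by intro hcon; exact hp hcon.1)]
        exact ih t (d ++ [c]) (by simp [List.filter_append, hp, h])

-- PySem.Set.ofList commutes with filter.
theorem pv_ofList_filter (q : Char → Bool) :
    ∀ (xs : List Char), (PySem.Set.ofList xs).filter q = PySem.Set.ofList (xs.filter q) := by
  intro xs
  induction xs with
  | nil => simp [PySem.Set.ofList_nil]
  | cons x xs ih =>
    by_cases hq : q x = true
    · have hfc : (x :: xs).filter q = x :: xs.filter q := by
        rw [List.filter_cons, if_pos hq]
      rw [hfc, PySem.Set.ofList_cons, PySem.Set.ofList_cons]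
      simp only [PySem.Set.discard]
      rw [List.filter_cons, if_pos hq, List.filter_comm, ih]
    · have hfc : (x :: xs).filter q = xs.filter q := by
        rw [List.filter_cons, if_neg (by simp [hq])]
      rw [hfc, PySem.Set.ofList_cons]
      simp only [PySem.Set.discard]
      rw [List.filter_cons, if_neg (by simp [hq]), List.filter_comm, ih]
      apply List.filter_eq_self.mpr
      intro y hy
      have hym : y ∈ xs.filter q := (PySem.Set.mem_ofList _ _).mp hy
      have hyq : q y = true := (List.mem_filter.mp hym).2
      simp only [Bool.not_eq_eq_eq_not, Bool.not_true, beq_eq_false_iff_ne]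
      intro hyx
      exact hq (hyx ▸ hyq)

-- B's recursion equals the filtered first-occurrence dedup of the list.
theorem pv_lsubRec_spec (k : Int) :
    ∀ (n : ℕ) (l : List Char), l.length = n →
      lsubRec l k = (PySem.Set.ofList l).filter (fun c => decide ((l.count c : Int) ≥ k)) := by
  intro n
  induction n using Nat.strong_induction_on with
  | _ n ih =>
    intro l hn
    match l, hn with
    | [], _ => rw [lsubRec.eq_def]; simp [PySem.Set.ofList_nil]
    | c :: rest, hn =>
      rw [lsubRec.eq_def]
      show (if ((c :: rest).count c : Int) ≥ k then [c] else []) ++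
            lsubRec (rest.filter (fun d => !(d == c))) k
          = (PySem.Set.ofList (c :: rest)).filter
              (fun x => decide (((c :: rest).count x : Int) ≥ k))
      have hlen : (rest.filter (fun d => !(d == c))).length < n := by
        subst hn; exact Nat.lt_succ_of_le (List.length_filter_le _ _)
      rw [ih _ hlen (rest.filter (fun d => !(d == c))) rfl]
      have hcong :
          (PySem.Set.ofList (rest.filter (fun d => !(d == c)))).filter
              (fun x => decide (((rest.filter (fun d => !(d == c))).count x : Int) ≥ k))
            = (PySem.Set.ofList (rest.filter (fun d => !(d == c)))).filter
              (fun x => decide (((c :: rest).count x : Int) ≥ k)) := by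
        apply List.filter_congr
        intro x hx
        have hxmem : x ∈ rest.filter (fun d => !(d == c)) := (PySem.Set.mem_ofList _ _).mp hx
        have hxc : x ≠ c := by
          have := (List.mem_filter.mp hxmem).2
          simpa using this
        have hcount : (rest.filter (fun d => !(d == c))).count x = (c :: rest).count x := by
          rw [List.count_filter (by simp [hxc]), List.count_cons]
          simp [Ne.symm hxc]
        simp [hcount]
      rw [hcong, PySem.Set.ofList_cons]
      simp only [PySem.Set.discard]
      rw [pv_ofList_filter (fun y => !(y == c)) rest, List.filter_cons]
      by_cases hk : k ≤ ((rest.count c : Int) + 1)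
      · simp [hk]
      · simp [hk]

-- ===== VERDICT =====
theorem largest_subsequence_spec : Claim_equal_largest_subsequence := by
  intro s k _
  unfold Spec_largest_subsequence largest_subsequence largest_subsequence_alt
  simp only [PySem.Dict.getD_foldl_insert_add_one, PySem.Dict.getD_empty]
  rw [pv_lsubRec_spec k s.toList.length s.toList rfl]
  rw [PySem.Set.ofList_eq_foldl]
  congr 1
  have h := pv_fold_filter (fun c => decide ((s.toList.count c : Int) ≥ k)) s.toList [] [] rfl
  simp only [decide_eq_true_eq] at h ⊢
  convert h using 3
  simp [ge_iff_le]
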